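-- pv_equiv track=rewrite | github.com/pypi-data/pypi-mirror-389 | packages/deployx/deployx-0.7.0.tar.gz/deployx-0.7.0/platforms/env_interface.py | validate_environment_variables
-- ===== SOURCE A (Python) =====
-- from typing import Dict, Tuple, Optional
--
-- def validate_environment_variables(env_vars: Dict[str, str]) -> Tuple[bool, str]:
--     """
--     Validate environment variables before setting.
--
--     Args:
--         env_vars: Environment variables to validate
--
--     Returns:
--         Tuple of (is_valid, error_message)
--     """
--     if not env_vars:
--         return False, "No environment variables provided"
--
--     # Check for empty keys
--     empty_keys = [key for key, value in env_vars.items() if not key.strip()]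
--     if empty_keys:
--         return False, "Environment variable keys cannot be empty"
--
--     # Check for invalid characters in keys (platform-specific validation can override)
--     invalid_keys = []
--     for key in env_vars.keys():
--         if not key.replace('_', '').replace('-', '').isalnum():
--             invalid_keys.append(key)
--
--     if invalid_keys:
--         return False, f"Invalid characters in keys: {', '.join(invalid_keys)}"
--
--     return True, ""
-- ===== SOURCE B (Python) =====
-- from typing import Dict, Tuple
--
--
-- def _classify(key: str) -> int:
--     """Classify a key in ONE scan of its characters, with no intermediate
--     strings: 0 = empty (whitespace-only or ''), 1 = invalid characters,
--     2 = valid.  A key is valid iff every character is alphanumeric or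
--     '_'/'-' and at least one character is alphanumeric."""
--     all_ws = True
--     has_alnum = False
--     ok = True
--     for c in key:
--         if not c.isspace():
--             all_ws = False
--         if c.isalnum():
--             has_alnum = True
--         elif c not in '_-':
--             ok = False
--     if all_ws:
--         return 0
--     if ok and has_alnum:
--         return 2
--     return 1
--
--
-- def validate_environment_variables(env_vars: Dict[str, str]) -> Tuple[bool, str]:
--     if not env_vars:
--         return False, "No environment variables provided"
--     codes = [(key, _classify(key)) for key in env_vars]
--     if any(c == 0 for _, c in codes):
--         return False, "Environment variable keys cannot be empty"
--     bad = [key for key, c in codes if c == 1]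
--     if bad:
--         return False, f"Invalid characters in keys: {', '.join(bad)}"
--     return True, ""
-- ===== Notes on version B (the rewrite author's own statement) =====
-- stated objective: alternative
-- what changed: A decides each check by building intermediate strings with strip/replace/isalnum in two separate scans over the keys; B instead classifies every key once by a single character-level scan (tracking all-whitespace, has-alphanumeric and only-allowed-characters flags), then reads the three precomputed classes off to produce the same messages in the same precedence.
import Mathlib
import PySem

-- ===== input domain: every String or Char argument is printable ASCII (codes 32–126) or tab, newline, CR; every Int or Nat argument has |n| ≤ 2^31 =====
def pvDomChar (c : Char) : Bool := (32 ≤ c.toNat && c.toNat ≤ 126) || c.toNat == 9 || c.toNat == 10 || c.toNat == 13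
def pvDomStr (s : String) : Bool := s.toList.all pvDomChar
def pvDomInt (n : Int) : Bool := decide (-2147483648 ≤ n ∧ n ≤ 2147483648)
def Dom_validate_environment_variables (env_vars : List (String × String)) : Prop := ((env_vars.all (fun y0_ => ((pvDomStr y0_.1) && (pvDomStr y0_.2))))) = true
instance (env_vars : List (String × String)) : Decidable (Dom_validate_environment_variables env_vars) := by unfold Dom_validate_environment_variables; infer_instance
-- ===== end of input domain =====

-- B classifies each key by one character-level scan (flags: all-whitespace /
-- has-alphanumeric / only-allowed-characters) instead of A's intermediate
-- strings built with strip/replace/isalnum (objective: alternative).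

-- ===== PORT A =====

-- not key.strip()   (truthiness of a string = it is empty)
def pvIsEmptyKey (key : String) : Bool := PySem.Str.len (PySem.Str.strip key) == 0

-- not key.replace('_', '').replace('-', '').isalnum()
def pvIsInvalidKey (key : String) : Bool :=
  !(PySem.Str.strIsalnum (PySem.Str.replace (PySem.Str.replace key "_" "") "-" ""))

def validate_environment_variables (env_vars : List (String × String)) : Bool × String :=
  let d := PySem.Dict.ofList env_vars
  if d.items.isEmpty then (false, "No environment variables provided")
  else
    let empty_keys := (d.items.filter (fun kv => pvIsEmptyKey kv.1)).map (·.1)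
    if !empty_keys.isEmpty then (false, "Environment variable keys cannot be empty")
    else
      let invalid_keys := d.keys.foldl
        (fun acc key => if pvIsInvalidKey key then acc ++ [key] else acc) []
      if !invalid_keys.isEmpty then
        (false, "Invalid characters in keys: " ++ PySem.Str.join ", " invalid_keys)
      else (true, "")

-- ===== PORT B =====

-- _classify: one pass over the characters, three flags, then a code 0/1/2
def pvClassify (key : String) : Nat :=
  let st := key.toList.foldl
    (fun (st : Bool × Bool × Bool) c =>
      ((if !PySem.Chars.isspace c then false else st.1),
       (if PySem.Chars.isalnum c then true else st.2.1),
       (if PySem.Chars.isalnum c then st.2.2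
        else if c = '_' ∨ c = '-' then st.2.2 else false)))
    (true, false, true)
  if st.1 then 0
  else if st.2.2 && st.2.1 then 2
  else 1

def validate_environment_variables_alt (env_vars : List (String × String)) : Bool × String :=
  let d := PySem.Dict.ofList env_vars
  if d.items.isEmpty then (false, "No environment variables provided")
  else
    let codes := d.keys.map (fun key => (key, pvClassify key))
    if codes.any (fun kc => kc.2 == 0) then
      (false, "Environment variable keys cannot be empty")
    else
      let bad := (codes.filter (fun kc => kc.2 == 1)).map (·.1)
      if !bad.isEmpty then
        (false, "Invalid characters in keys: " ++ PySem.Str.join ", " bad)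
      else (true, "")

-- ===== PRECONDITION & SPEC =====
def Spec_validate_environment_variables (env_vars : List (String × String)) (out : Bool × String) : Prop := out = validate_environment_variables_alt env_vars
instance (env_vars : List (String × String)) (out : Bool × String) : Decidable (Spec_validate_environment_variables env_vars out) := by unfold Spec_validate_environment_variables; infer_instance

-- ===== CLAIM (what is proved, stated in full; the proofs are below) =====
def Claim_equal_validate_environment_variables : Prop := ∀ (env_vars : List (String × String)), Dom_validate_environment_variables env_vars → Spec_validate_environment_variables env_vars (validate_environment_variables env_vars)

-- ===== LEMMAS AND PROOFS =====

-- a character A's transformed key keeps iff it is not '_' or '-'; pvGood accepts what survives or is removed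
def pvGood (c : Char) : Bool := PySem.Chars.isalnum c || (c == '_') || (c == '-')

-- B's fold computes the three flags
theorem pv_classify_fold (cs : List Char) (a h o : Bool) :
    cs.foldl
      (fun (st : Bool × Bool × Bool) c =>
        ((if !PySem.Chars.isspace c then false else st.1),
         (if PySem.Chars.isalnum c then true else st.2.1),
         (if PySem.Chars.isalnum c then st.2.2
          else if c = '_' ∨ c = '-' then st.2.2 else false)))
      (a, h, o)
    = (a && cs.all PySem.Chars.isspace,
       h || cs.any PySem.Chars.isalnum,
       o && cs.all pvGood) := by
  induction cs generalizing a h o with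
  | nil => simp
  | cons c t ih =>
    simp only [List.foldl_cons, ih, List.all_cons, List.any_cons]
    by_cases hu : c = '_' ∨ c = '-'
    · rcases hu with rfl | rfl <;>
        simp [pvGood, show PySem.Chars.isspace '_' = false from by decide,
          show PySem.Chars.isspace '-' = false from by decide,
          show PySem.Chars.isalnum '_' = false from by decide,
          show PySem.Chars.isalnum '-' = false from by decide]
    · have hg : pvGood c = PySem.Chars.isalnum c := by
        have h1 : (c == '_') = false := by simp; exact fun hh => hu (Or.inl hh)
        have h2 : (c == '-') = false := by simp; exact fun hh => hu (Or.inr hh)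
        simp [pvGood, h1, h2]
      by_cases hs : PySem.Chars.isspace c = true <;>
        by_cases ha : PySem.Chars.isalnum c = true <;>
          simp [hs, ha, hu, hg]

-- strip is empty iff every character is whitespace
theorem pv_strip_nil (cs : List Char) :
    (PySem.Chars.strip cs = [] ) ↔ cs.all PySem.Chars.isspace = true := by
  unfold PySem.Chars.strip PySem.Chars.rstrip PySem.Chars.lstrip
  constructor
  · intro hsp
    have h1 : ∀ c ∈ List.dropWhile PySem.Chars.isspace cs, PySem.Chars.isspace c = true := by
      intro c hc
      have h2 := List.reverse_eq_nil_iff.mp hsp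
      have h3 := List.dropWhile_eq_nil_iff.mp h2
      exact h3 c (by simpa using hc)
    rw [List.all_eq_true]
    intro c hc
    rw [← List.takeWhile_append_dropWhile (p := PySem.Chars.isspace) (l := cs),
      List.mem_append] at hc
    rcases hc with h | h
    · exact List.mem_takeWhile_imp h
    · exact h1 c h
  · intro hall
    have : List.dropWhile PySem.Chars.isspace cs = [] := by
      rw [List.dropWhile_eq_nil_iff]
      intro c hc; exact (List.all_eq_true.mp hall) c hc
    simp [this]

-- replace with a one-character pattern and empty replacement is a filter
theorem pv_replace_go_filter (x : Char) (l : List Char) (fuel : Nat) (acc : List Char)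
    (hf : l.length ≤ fuel) :
    PySem.Chars.replace.go [x] [] fuel l acc = acc.reverse ++ l.filter (fun c => !(c == x)) := by
  induction l generalizing fuel acc with
  | nil => cases fuel <;> simp [PySem.Chars.replace.go]
  | cons c t ih =>
    cases fuel with
    | zero => simp at hf
    | succ f =>
      have hf' : t.length ≤ f := by simpa using hf
      by_cases hx : c = x
      · subst hx
        simp [PySem.Chars.replace.go, List.isPrefixOf, ih _ _ hf']
      · have hpre : ([x].isPrefixOf (c :: t)) = false := by
          simp [List.isPrefixOf]
          exact fun hcx => absurd hcx.symm hx
        simp [PySem.Chars.replace.go, hpre, ih _ _ hf', hx]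

theorem pv_replace_filter (cs : List Char) (x : Char) :
    PySem.Chars.replace cs [x] [] = cs.filter (fun c => !(c == x)) := by
  unfold PySem.Chars.replace
  simp [pv_replace_go_filter x cs cs.length [] (le_refl _)]

-- A's invalid test equals the two flags of B's scan
theorem pv_strIsalnum_filter (k : String) (l : List Char)
    (hmem : ∀ c, c ∈ l ↔ (c ∈ k.toList ∧ c ≠ '_' ∧ c ≠ '-')) :
    PySem.Chars.strIsalnum l = (k.toList.all pvGood && k.toList.any PySem.Chars.isalnum) := by
  unfold PySem.Chars.strIsalnum
  rcases hall : k.toList.all pvGood with _ | _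
  · -- some character is neither alphanumeric nor '_'/'-': it survives the filters and fails isalnum
    obtain ⟨d, hdm, hdg⟩ := List.all_eq_false.mp hall
    simp only [pvGood, Bool.or_eq_true, beq_iff_eq] at hdg
    have hd1 : PySem.Chars.isalnum d = false := by
      rcases hda : PySem.Chars.isalnum d with _ | _
      · rfl
      · exact absurd (Or.inl (Or.inl hda)) (by simpa using hdg)
    have hd2 : d ≠ '_' := fun hh => hdg (Or.inl (Or.inr hh))
    have hd3 : d ≠ '-' := fun hh => hdg (Or.inr hh)
    have hdl : d ∈ l := (hmem d).mpr ⟨hdm, hd2, hd3⟩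
    have hlf : l.all PySem.Chars.isalnum = false :=
      List.all_eq_false.mpr ⟨d, hdl, by simp [hd1]⟩
    simp [hlf]
  · rcases hany : k.toList.any PySem.Chars.isalnum with _ | _
    · -- all characters are '_' or '-' (or none): the filtered string is empty
      have hl0 : l = [] := by
        rcases hl1 : l with _ | ⟨c, t⟩
        · rfl
        · exfalso
          have hcl : c ∈ l := by rw [hl1]; exact List.mem_cons_self
          obtain ⟨hcm, h1, h2⟩ := (hmem c).mp hcl
          have hg := List.all_eq_true.mp hall c hcm
          simp only [pvGood, Bool.or_eq_true, beq_iff_eq] at hg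
          rcases hg with (hh | hh) | hh
          · exact absurd (List.any_eq_true.mpr ⟨c, hcm, hh⟩) (by simp [hany])
          · exact h1 hh
          · exact h2 hh
      simp [hl0]
    · -- an alphanumeric character exists and every character is allowed: filtered nonempty, all alnum
      obtain ⟨c, hcm, hcal⟩ := List.any_eq_true.mp hany
      have hc1 : c ≠ '_' := fun hh => by rw [hh] at hcal; exact absurd hcal (by decide)
      have hc2 : c ≠ '-' := fun hh => by rw [hh] at hcal; exact absurd hcal (by decide)
      have hcl : c ∈ l := (hmem c).mpr ⟨hcm, hc1, hc2⟩
      have hne : l.isEmpty = false := by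
        rcases hl1 : l with _ | _
        · rw [hl1] at hcl; simp at hcl
        · rfl
      have hla : l.all PySem.Chars.isalnum = true := by
        rw [List.all_eq_true]
        intro d hd
        obtain ⟨hdm, hd1, hd2⟩ := (hmem d).mp hd
        have hg := List.all_eq_true.mp hall d hdm
        simp only [pvGood, Bool.or_eq_true, beq_iff_eq] at hg
        rcases hg with (hh | hh) | hh
        · exact hh
        · exact absurd hh hd1
        · exact absurd hh hd2
      simp [hne, hla]

theorem pv_invalid_eq (k : String) :
    pvIsInvalidKey k = !(k.toList.all pvGood && k.toList.any PySem.Chars.isalnum) := by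
  unfold pvIsInvalidKey
  have hb : PySem.Str.strIsalnum (PySem.Str.replace (PySem.Str.replace k "_" "") "-" "")
      = PySem.Chars.strIsalnum
          ((k.toList.filter (fun c => !(c == '_'))).filter (fun c => !(c == '-'))) := by
    simp [PySem.Str.strIsalnum_eq, PySem.Str.toList_replace, pv_replace_filter]
  have hm := pv_strIsalnum_filter k
    ((k.toList.filter (fun c => !(c == '_'))).filter (fun c => !(c == '-')))
    (by
      intro c
      constructor
      · intro hc
        have h1 := List.mem_filter.mp hc
        have h2 := List.mem_filter.mp h1.1
        refine ⟨h2.1, ?_, ?_⟩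
        · simpa using h2.2
        · simpa using h1.2
      · rintro ⟨hc, hu, hh⟩
        exact List.mem_filter.mpr ⟨List.mem_filter.mpr ⟨hc, by simpa⟩, by simpa⟩)
  rw [hb, hm]

-- B's code 0 is exactly A's empty test
theorem pv_classify_zero (k : String) : (pvClassify k == 0) = pvIsEmptyKey k := by
  unfold pvClassify pvIsEmptyKey
  rw [pv_classify_fold]
  have hlen : PySem.Str.len (PySem.Str.strip k) = (PySem.Chars.strip k.toList).length := by
    simp [PySem.Str.len_eq, PySem.Str.toList_strip]
  rcases hall : k.toList.all PySem.Chars.isspace with _ | _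
  · have h1 : PySem.Chars.strip k.toList ≠ [] := fun h => by
      rw [(pv_strip_nil _).mp h] at hall; exact Bool.noConfusion hall
    have h2 : (PySem.Chars.strip k.toList).length ≠ 0 := by
      simpa [List.length_eq_zero_iff] using h1
    simp only [Bool.and_false, hlen]
    simp [h2]
    split <;> simp
  · have h1 : PySem.Chars.strip k.toList = [] := (pv_strip_nil _).mpr hall
    simp [h1]

-- under "not empty", B's code 1 is exactly A's invalid test
theorem pv_classify_one (k : String) (hk : pvIsEmptyKey k = false) :
    (pvClassify k == 1) = pvIsInvalidKey k := by
  have h0 : (pvClassify k == 0) = false := by rw [pv_classify_zero, hk]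
  rw [pv_invalid_eq]
  unfold pvClassify at h0 ⊢
  rw [pv_classify_fold] at h0 ⊢
  rcases hall : k.toList.all PySem.Chars.isspace with _ | _
  · simp only [hall, Bool.and_false] at h0 ⊢
    rcases h : (k.toList.all pvGood && k.toList.any PySem.Chars.isalnum) with _ | _ <;>
      simp [h]
  · simp [hall] at h0

-- A's append loop is a filter
theorem pv_foldA (keys : List String) (i : List String) :
    keys.foldl (fun acc key => if pvIsInvalidKey key then acc ++ [key] else acc) i
    = i ++ keys.filter pvIsInvalidKey := by
  induction keys generalizing i with
  | nil => simp
  | cons k ks ih =>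
    by_cases hk : pvIsInvalidKey k = true
    · simp [List.foldl_cons, hk, ih]
    · simp [List.foldl_cons, hk, ih]

-- ===== VERDICT (by name: the statement is the Claim_ definition above) =====
theorem validate_environment_variables_spec : Claim_equal_validate_environment_variables := by
  intro env_vars _
  show validate_environment_variables env_vars = validate_environment_variables_alt env_vars
  unfold validate_environment_variables validate_environment_variables_alt
  set d := PySem.Dict.ofList env_vars with hd
  by_cases h0 : d.items.isEmpty
  · simp [h0]
  · simp only [h0, if_false, Bool.false_eq_true]
    have hkeys : d.keys = d.items.map (·.1) := rfl
    have hany : (d.keys.map (fun key => (key, pvClassify key))).any (fun kc => kc.2 == 0)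
        = d.keys.any pvIsEmptyKey := by
      rw [List.any_map]
      simp [Function.comp_def, pv_classify_zero]
    have hAempty : ((d.items.filter (fun kv => pvIsEmptyKey kv.1)).map (·.1)).isEmpty
        = !(d.keys.any pvIsEmptyKey) := by
      rw [hkeys, List.any_map]
      rcases h : d.items.any (fun kv => pvIsEmptyKey kv.1) with _ | _
      · have h' := List.any_eq_false.mp h
        have hnil : d.items.filter (fun kv => pvIsEmptyKey kv.1) = [] :=
          List.filter_eq_nil_iff.mpr (fun kv hkv => by simpa using h' kv hkv)
        simp [hnil, Function.comp_def, h]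
      · obtain ⟨kv, hmv, hp⟩ := List.any_eq_true.mp h
        have hmm : kv ∈ d.items.filter (fun kv => pvIsEmptyKey kv.1) :=
          List.mem_filter.mpr ⟨hmv, hp⟩
        have hne : ((d.items.filter (fun kv => pvIsEmptyKey kv.1)).map (·.1)).isEmpty = false := by
          rcases hfil : d.items.filter (fun kv => pvIsEmptyKey kv.1) with _ | ⟨a, l⟩
          · rw [hfil] at hmm; simp at hmm
          · simp [hfil]
        rw [hne]
        simp [Function.comp_def, h]
    rcases hE : d.keys.any pvIsEmptyKey with _ | _
    · -- no empty keys
      have hnoE : ∀ k ∈ d.keys, pvIsEmptyKey k = false := by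
        rw [List.any_eq_false] at hE; intro k hk; simpa using hE k hk
      have h1 : (d.keys.map (fun key => (key, pvClassify key))).filter (fun kc => kc.2 == 1)
          = (d.keys.filter (fun k => pvClassify k == 1)).map (fun key => (key, pvClassify key)) := by
        rw [List.filter_map]; rfl
      have h2 : d.keys.filter (fun k => pvClassify k == 1) = d.keys.filter pvIsInvalidKey :=
        List.filter_congr (fun k hk => by rw [pv_classify_one k (hnoE k hk)])
      simp only [hany, hE, hAempty, pv_foldA, List.nil_append, h1, h2, Bool.not_false]
      rcases hI : (d.keys.filter pvIsInvalidKey).isEmpty with _ | _ <;>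
        simp [hI, List.map_map, Function.comp_def]
    · simp [hany, hE, hAempty]
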